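-- pv_equiv track=rewrite | github.com/AndrijanaIvkovic/Sequence_alignment | poravnanje.py | poklapanje
-- ===== SOURCE A (Python) =====
-- def poklapanje(s1, s2):
--     a=len(s1)
--     b=len(s2)
--     br_d=0
--     br_l=0
--     maxx=0
--     min_br=0
--     # desna rotacija
--     for i in range(a):
--         max_d=0
--         # proverava koji je string duzi da bi znali do kog clana stringa proveravamo poklapanje
--         if(a<=b):
--             for j in range(a):
--                 if(s1[j]==s2[j]):
--                     max_d+=1
--             # cuvamo najveci
--             if(max_d==maxx)and(br_d<min_br):
--                 maxx=max_d
--                 min_br=br_d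
--             if(max_d>maxx):
--                 maxx=max_d
--                 min_br=br_d
--             # rotacija u desno
--             s1=s1[-1]+s1[:-1]
--             br_d+=1
--         else:
--             for j in range(b):
--                 if(s1[j]==s2[j]):
--                     max_d+=1
--             if(max_d==maxx)and(br_d<min_br):
--                 maxx=max_d
--                 min_br=br_d
--             if(max_d>maxx):
--                 maxx=max_d
--                 min_br=br_d
--             s1=s1[-1]+s1[:-1]
--             br_d+=1
--
--     # leva rotacija
--     for i in range(a):
--         max_l=0
--         # proverava koji je string duzi da bi znali do kog clana stringa proveravamo poklapanje
--         if(a<=b):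
--             for j in range(a):
--                 if(s1[j]==s2[j]):
--                     max_l+=1
--             # cuvamo najveci
--             if(max_l==maxx)and(br_l<min_br):
--                 maxx=max_l
--                 min_br=br_l
--             if(max_l>maxx):
--                 maxx=max_l
--                 min_br=br_l
--             # rotacija u levo
--             s1=s1[1:]+s1[0]
--             br_l+=1
--         else:
--             for j in range(b):
--                 if(s1[j]==s2[j]):
--                     max_l+=1
--             if(max_l==maxx)and(br_l<min_br):
--                 maxx=max_l
--                 min_br=br_l
--             if(max_l>maxx):
--                 maxx=max_l
--                 min_br=br_l
--             s1=s1[1:]+s1[0]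
--             br_l+=1
--
--     return (maxx, min_br)
-- ===== SOURCE B (Python) =====
-- def _select(a, m):
--     # closed-form replay of A's (max, tie-break): first maximal shift going right,
--     # possibly improved by the first maximal shift going left
--     M = max(m)
--     if m[0] == M:
--         return (M, 0)
--     best_right = a - max(j for j in range(1, a) if m[j] == M)
--     best_left = min(j for j in range(1, a) if m[j] == M)
--     return (M, min(best_right, best_left))
--
--
-- def poklapanje(s1, s2):
--     # One pass of per-shift match counts over the doubled string, then a
--     # closed-form tie-break instead of replaying two stateful rotation loops.
--     a = len(s1)
--     b = len(s2)
--     if a == 0: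
--         return (0, 0)
--     L = min(a, b)
--     d = s1 + s1
--     t2 = s2[:L]
--     m = [sum(x == y for x, y in zip(d[i:i+L], t2)) for i in range(a)]
--     return _select(a, m)
-- ===== Notes on version B (the rewrite author's own statement) =====
-- stated objective: faster
-- what changed: B computes every shift's match count once as slices of the doubled string s1+s1 (no string rotations, no second pass) and picks A's (max, tie-break) result by a closed-form rule on the first/last maximal shift, instead of A's two stateful loops that rebuild s1 by rotation 2*len(s1) times.
import Mathlib
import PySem

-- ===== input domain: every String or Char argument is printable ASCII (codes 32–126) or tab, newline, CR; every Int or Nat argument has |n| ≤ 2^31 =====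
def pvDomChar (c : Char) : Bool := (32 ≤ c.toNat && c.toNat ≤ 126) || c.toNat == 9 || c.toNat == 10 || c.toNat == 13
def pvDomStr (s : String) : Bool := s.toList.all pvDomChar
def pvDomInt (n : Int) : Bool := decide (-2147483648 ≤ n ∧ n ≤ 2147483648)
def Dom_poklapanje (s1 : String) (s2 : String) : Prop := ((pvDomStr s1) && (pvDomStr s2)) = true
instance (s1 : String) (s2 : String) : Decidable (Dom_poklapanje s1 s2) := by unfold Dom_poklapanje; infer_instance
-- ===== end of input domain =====

-- B replaces A's two stateful rotation loops (which rebuild s1 by slicing 2*len(s1) times) by one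
-- pass of per-shift match counts over the doubled string plus a closed-form tie-break (objective:
-- faster, constant-factor).

-- ===== PORT A =====

-- inner 'for j in range(n): if s1[j]==s2[j]: cnt += 1'; every call site has n ≤ both lengths,
-- so getD is exactly Python's s[j]
def pvCnt (x y : List Char) (n : Nat) : Int :=
  (List.range n).foldl (fun acc j => if x.getD j ' ' = y.getD j ' ' then acc + 1 else acc) 0

-- s1 = s1[-1] + s1[:-1]  (the 'none' arm is unreachable: the loop body only runs on nonempty s1)
def pvRotR (l : List Char) : List Char :=
  match PySem.List.pyGet? l (-1) with
  | none => l
  | some c => c :: PySem.List.slice l none (some (-1))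

-- s1 = s1[1:] + s1[0]  (same remark)
def pvRotL (l : List Char) : List Char :=
  PySem.List.slice l (some 1) none ++
    (match PySem.List.pyGet? l 0 with | none => [] | some c => [c])

-- 'for i in range(a)' of the right-rotation loop, state (s1, br_d, maxx, min_br)
def pvLoopR (s2 : List Char) (a b : Nat) :
    Nat → List Char × Int × Int × Int → List Char × Int × Int × Int
  | 0, st => st
  | n+1, (s1, br, maxx, minbr) =>
    if a ≤ b then
      let md := pvCnt s1 s2 a
      let p := if md = maxx ∧ br < minbr then (md, br) else (maxx, minbr)
      let q := if md > p.1 then (md, br) else p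
      pvLoopR s2 a b n (pvRotR s1, br + 1, q.1, q.2)
    else
      let md := pvCnt s1 s2 b
      let p := if md = maxx ∧ br < minbr then (md, br) else (maxx, minbr)
      let q := if md > p.1 then (md, br) else p
      pvLoopR s2 a b n (pvRotR s1, br + 1, q.1, q.2)

-- 'for i in range(a)' of the left-rotation loop, state (s1, br_l, maxx, min_br)
def pvLoopL (s2 : List Char) (a b : Nat) :
    Nat → List Char × Int × Int × Int → List Char × Int × Int × Int
  | 0, st => st
  | n+1, (s1, br, maxx, minbr) =>
    if a ≤ b then
      let md := pvCnt s1 s2 a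
      let p := if md = maxx ∧ br < minbr then (md, br) else (maxx, minbr)
      let q := if md > p.1 then (md, br) else p
      pvLoopL s2 a b n (pvRotL s1, br + 1, q.1, q.2)
    else
      let md := pvCnt s1 s2 b
      let p := if md = maxx ∧ br < minbr then (md, br) else (maxx, minbr)
      let q := if md > p.1 then (md, br) else p
      pvLoopL s2 a b n (pvRotL s1, br + 1, q.1, q.2)

def pvAcore (l1 l2 : List Char) : List Int :=
  let a := l1.length
  let b := l2.length
  let r := pvLoopR l2 a b a (l1, 0, 0, 0)
  let s := pvLoopL l2 a b a (r.1, 0, r.2.2.1, r.2.2.2)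
  [s.2.2.1, s.2.2.2]

def poklapanje (s1 : String) (s2 : String) : List Int :=
  pvAcore s1.toList s2.toList

-- ===== PORT B =====

-- sum(x == y for x, y in zip(d[i:i+L], t2))
def pvMB (d t2 : List Char) (L i : Nat) : Int :=
  (((PySem.List.slice d (some (i : Int)) (some ((i : Int) + (L : Int)))).zip t2).countP
      (fun p => decide (p.1 = p.2)) : Int)

-- Source B's _select(a, m); the two 'j in range(1, a) if m[j] == M' generators are nonempty whenever
-- this branch runs, so the getD 0 default is unreachable
def pvBsel (a : Nat) (m : List Int) : List Int :=
  let M : Int := (PySem.List.max? m (fun x => x)).getD 0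
  if m.getD 0 0 = M then [M, 0]
  else
    let js := (List.range' 1 (a - 1)).filter (fun j => decide (m.getD j 0 = M))
    let bestRight : Int := (a : Int) - (((PySem.List.max? js (fun x => x)).getD 0 : Nat) : Int)
    let bestLeft : Int := (((PySem.List.min? js (fun x => x)).getD 0 : Nat) : Int)
    [M, min bestRight bestLeft]

def pvBcore (l1 l2 : List Char) : List Int :=
  let a := l1.length
  let b := l2.length
  if a = 0 then [0, 0] else
  let L := min a b
  let d := l1 ++ l1
  let t2 := PySem.List.slice l2 none (some (L : Int))
  pvBsel a ((List.range a).map (pvMB d t2 L))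

def poklapanje_alt (s1 : String) (s2 : String) : List Int :=
  pvBcore s1.toList s2.toList

-- ===== PRECONDITION & SPEC =====
def Spec_poklapanje (s1 : String) (s2 : String) (out : List Int) : Prop := out = poklapanje_alt s1 s2
instance (s1 : String) (s2 : String) (out : List Int) : Decidable (Spec_poklapanje s1 s2 out) := by unfold Spec_poklapanje; infer_instance

-- ===== CLAIM (what is proved, stated in full; the proofs are below) =====
def Claim_equal_poklapanje : Prop := ∀ (s1 : String) (s2 : String), Dom_poklapanje s1 s2 → Spec_poklapanje s1 s2 (poklapanje s1 s2)

-- ===== LEMMAS AND PROOFS =====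

-- A's repeated update block, and the pure score dynamics shared by both of A's loops
def pvUpd (st : Int × Int) (v br : Int) : Int × Int :=
  let p := if v = st.1 ∧ br < st.2 then (v, br) else st
  if v > p.1 then (v, br) else p

def pvVFold (g : Nat → Int) : Nat → Nat → Int × Int → Int × Int
  | 0, _, st => st
  | n+1, t, st => pvVFold g n (t+1) (pvUpd st (g t) (t : Int))

theorem pvCnt_eq_countP (x y : List Char) (n : Nat) :
    pvCnt x y n = ((List.range n).countP (fun j => decide (x.getD j ' ' = y.getD j ' ')) : Int) := by
  unfold pvCnt
  rw [PySem.List.foldl_ite_add_one]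
  simp

theorem pvRotR_eq (l : List Char) (h : l ≠ []) : pvRotR l = l.rotate (l.length - 1) := by
  unfold pvRotR
  have hget : PySem.List.pyGet? l (-1) = some (l.getLast h) := by
    rw [PySem.List.pyGet?_neg_one, List.getLast?_eq_some_getLast]
  rw [hget, PySem.List.slice_to_neg_one]
  rw [List.rotate_eq_drop_append_take (by have := List.length_pos_iff.mpr h; omega)]
  rw [List.drop_length_sub_one h, List.dropLast_eq_take]
  rfl

theorem pvRotL_eq (l : List Char) (h : l ≠ []) : pvRotL l = l.rotate 1 := by
  unfold pvRotL
  obtain ⟨c, t, rfl⟩ := List.exists_cons_of_ne_nil h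
  have hget : PySem.List.pyGet? (c :: t) 0 = some c := PySem.List.pyGet?_zero_cons c t
  rw [hget, PySem.List.slice_from_one]
  simp [List.rotate_cons_succ]

theorem dblGet (l : List Char) (i : Nat) (_h0 : 0 < l.length) (h : i < 2 * l.length) :
    (l ++ l).getD i ' ' = l.getD (i % l.length) ' ' := by
  by_cases hi : i < l.length
  · rw [Nat.mod_eq_of_lt hi]
    rw [List.getD_eq_getElem _ _ (by simp; omega), List.getD_eq_getElem _ _ hi]
    rw [List.getElem_append_left hi]
  · have h1 : i % l.length = i - l.length := by
      rw [Nat.mod_eq_sub_mod (by omega), Nat.mod_eq_of_lt (by omega)]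
    rw [h1]
    rw [List.getD_eq_getElem _ _ (by simp; omega), List.getD_eq_getElem _ _ (by omega)]
    rw [List.getElem_append_right (by omega)]

theorem countP_zip_eq (x y : List Char) :
    ((x.zip y).countP (fun p => decide (p.1 = p.2)))
      = (List.range (min x.length y.length)).countP
          (fun j => decide (x.getD j ' ' = y.getD j ' ')) := by
  induction x generalizing y with
  | nil => simp
  | cons a xs ih =>
    cases y with
    | nil => simp
    | cons b ys =>
      simp only [List.zip_cons_cons, List.countP_cons, List.length_cons]
      have hmin : min (xs.length + 1) (ys.length + 1) = min xs.length ys.length + 1 := by omega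
      rw [hmin, List.range_succ_eq_map, List.countP_cons, List.countP_map]
      simp only [List.getD_cons_zero, List.getD_cons_succ, Function.comp_def]
      rw [ih ys]

theorem cnt_rotate_eq_pvMB (l1 l2 : List Char) (k : Nat) (h0 : 0 < l1.length) :
    pvCnt (l1.rotate k) l2 (min l1.length l2.length)
      = pvMB (l1 ++ l1) (PySem.List.slice l2 none (some ((min l1.length l2.length : Nat) : Int)))
          (min l1.length l2.length) (k % l1.length) := by
  set a := l1.length with ha
  set L := min l1.length l2.length with hL
  set i := k % a with hi
  have hiL : i < a := Nat.mod_lt _ h0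
  have hLa : L ≤ a := Nat.min_le_left _ _
  have hLb : L ≤ l2.length := Nat.min_le_right _ _
  unfold pvMB
  rw [PySem.List.slice_natCast_add, PySem.List.slice_to_natCast]
  have hxlen : (((l1 ++ l1).drop i).take L).length = L := by
    simp [List.length_take, List.length_drop]; omega
  have hylen : (l2.take L).length = L := by simp [List.length_take]; omega
  rw [countP_zip_eq, hxlen, hylen, Nat.min_self, pvCnt_eq_countP]
  congr 1
  apply List.countP_congr
  intro j hj
  simp only [List.mem_range] at hj
  have e1 : (l1.rotate k).getD j ' ' = l1.getD ((i + j) % a) ' ' := by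
    rw [List.getD_eq_getElem _ _ (by simp [List.length_rotate]; omega),
        List.getD_eq_getElem _ _ (Nat.mod_lt _ h0)]
    rw [List.getElem_rotate]
    have hidx : (j + k) % l1.length = (i + j) % l1.length := by
      rw [Nat.add_comm i j]
      conv_rhs => rw [hi, Nat.add_mod_mod]
    simp only [hidx]
  have e2 : (((l1 ++ l1).drop i).take L).getD j ' ' = l1.getD ((i + j) % a) ' ' := by
    rw [List.getD_eq_getElem _ _ (by omega)]
    rw [List.getElem_take, List.getElem_drop]
    have : (l1 ++ l1)[i + j]'(by simp; omega) = (l1 ++ l1).getD (i + j) ' ' := by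
      rw [List.getD_eq_getElem _ _ (by simp; omega)]
    rw [this, dblGet l1 (i + j) h0 (by omega)]
  have e3 : (l2.take L).getD j ' ' = l2.getD j ' ' := by
    rw [List.getD_eq_getElem _ _ (by omega), List.getD_eq_getElem _ _ (by omega)]
    rw [List.getElem_take]
  rw [e1, e2, e3]

theorem rotidx (a s : Nat) (h1 : 1 ≤ s) (h2 : s < a) : (s * (a - 1)) % a = a - s := by
  have key : s * (a - 1) = (s - 1) * a + (a - s) := by
    rw [Nat.mul_sub, Nat.sub_mul]
    have hsa : s ≤ s * a := Nat.le_mul_of_pos_right s (by omega)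
    have haa : a ≤ s * a := Nat.le_mul_of_pos_left a (by omega)
    omega
  rw [key]
  rw [Nat.mul_add_mod']
  exact Nat.mod_eq_of_lt (by omega)

theorem loopR_eq (l1 l2 : List Char) (b : Nat) (h0 : 0 < l1.length) (hb : b = l2.length) :
    ∀ (n t : Nat) (st : Int × Int),
      pvLoopR l2 l1.length b n (l1.rotate (t * (l1.length - 1)), (t : Int), st)
        = (l1.rotate ((t + n) * (l1.length - 1)), ((t + n : Nat) : Int),
            pvVFold (fun s => pvCnt (l1.rotate (s * (l1.length - 1))) l2 (min l1.length l2.length)) n t st) := by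
  subst hb
  intro n
  induction n with
  | zero => intro t st; simp [pvLoopR, pvVFold]
  | succ n ih =>
    intro t st
    obtain ⟨mx, mb⟩ := st
    have hnil : l1.rotate (t * (l1.length - 1)) ≠ [] := by
      rw [Ne, List.rotate_eq_nil_iff]
      intro hnl; rw [hnl] at h0; simp at h0
    have hrot : pvRotR (l1.rotate (t * (l1.length - 1)))
        = l1.rotate ((t + 1) * (l1.length - 1)) := by
      rw [pvRotR_eq _ hnil, List.length_rotate, List.rotate_rotate]
      congr 1; ring
    have hcast : (t : Int) + 1 = ((t + 1 : Nat) : Int) := by push_cast; ring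
    have harith : (t + 1) + n = t + (n + 1) := by omega
    by_cases hab : l1.length ≤ l2.length
    · have hmin : min l1.length l2.length = l1.length := Nat.min_eq_left hab
      rw [hmin]
      simp only [pvLoopR, if_pos hab]
      rw [hrot, hcast]
      have ih' := ih (t + 1)
        (pvUpd (mx, mb) (pvCnt (l1.rotate (t * (l1.length - 1))) l2 l1.length) (t : Int))
      rw [hmin, harith] at ih'
      exact ih'
    · have hab' : l2.length ≤ l1.length := by omega
      have hmin : min l1.length l2.length = l2.length := Nat.min_eq_right hab'
      rw [hmin]
      simp only [pvLoopR, if_neg hab]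
      rw [hrot, hcast]
      have ih' := ih (t + 1)
        (pvUpd (mx, mb) (pvCnt (l1.rotate (t * (l1.length - 1))) l2 l2.length) (t : Int))
      rw [hmin, harith] at ih'
      exact ih'

theorem loopL_eq (l1 l2 : List Char) (b : Nat) (h0 : 0 < l1.length) (hb : b = l2.length) :
    ∀ (n t : Nat) (st : Int × Int),
      pvLoopL l2 l1.length b n (l1.rotate t, (t : Int), st)
        = (l1.rotate (t + n), ((t + n : Nat) : Int),
            pvVFold (fun s => pvCnt (l1.rotate s) l2 (min l1.length l2.length)) n t st) := by
  subst hb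
  intro n
  induction n with
  | zero => intro t st; simp [pvLoopL, pvVFold]
  | succ n ih =>
    intro t st
    obtain ⟨mx, mb⟩ := st
    have hnil : l1.rotate t ≠ [] := by
      rw [Ne, List.rotate_eq_nil_iff]
      intro hnl; rw [hnl] at h0; simp at h0
    have hrot : pvRotL (l1.rotate t) = l1.rotate (t + 1) := by
      rw [pvRotL_eq _ hnil, List.rotate_rotate]
    have hcast : (t : Int) + 1 = ((t + 1 : Nat) : Int) := by push_cast; ring
    have harith : (t + 1) + n = t + (n + 1) := by omega
    by_cases hab : l1.length ≤ l2.length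
    · have hmin : min l1.length l2.length = l1.length := Nat.min_eq_left hab
      rw [hmin]
      simp only [pvLoopL, if_pos hab]
      rw [hrot, hcast]
      have ih' := ih (t + 1)
        (pvUpd (mx, mb) (pvCnt (l1.rotate t) l2 l1.length) (t : Int))
      rw [hmin, harith] at ih'
      exact ih'
    · have hab' : l2.length ≤ l1.length := by omega
      have hmin : min l1.length l2.length = l2.length := Nat.min_eq_right hab'
      rw [hmin]
      simp only [pvLoopL, if_neg hab]
      rw [hrot, hcast]
      have ih' := ih (t + 1)
        (pvUpd (mx, mb) (pvCnt (l1.rotate t) l2 l2.length) (t : Int))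
      rw [hmin, harith] at ih'
      exact ih'

theorem pvUpd_spec (mx mb v br : Int) :
    pvUpd (mx, mb) v br
      = if v = mx ∧ br < mb then (v, br) else if mx < v then (v, br) else (mx, mb) := by
  unfold pvUpd
  by_cases c1 : v = mx ∧ br < mb
  · rw [if_pos c1, if_pos c1]
    simp
  · rw [if_neg c1, if_neg c1]

theorem vfold_post (g : Nat → Int) (M minbr : Int) :
    ∀ (n t : Nat), (∀ s, t ≤ s → s < t + n → g s ≤ M) → minbr ≤ (t : Int) →
      pvVFold g n t (M, minbr) = (M, minbr) := by
  intro n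
  induction n with
  | zero => intro t _ _; rfl
  | succ n ih =>
    intro t hub hmb
    have hgt : g t ≤ M := hub t le_rfl (by omega)
    have hupd : pvUpd (M, minbr) (g t) (t : Int) = (M, minbr) := by
      rw [pvUpd_spec, if_neg (by rintro ⟨_, h2⟩; omega), if_neg (by omega)]
    show pvVFold g n (t + 1) (pvUpd (M, minbr) (g t) (t : Int)) = (M, minbr)
    rw [hupd]
    exact ih (t + 1) (fun s h1 h2 => hub s (by omega) (by omega)) (by push_cast; omega)

theorem vfoldA (g : Nat → Int) (M : Int) :
    ∀ (n t : Nat) (maxx minbr : Int) (s₀ : Nat),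
      (∀ s, t ≤ s → s < t + n → g s ≤ M) → maxx < M → minbr ≤ (t : Int) →
      t ≤ s₀ → s₀ < t + n → g s₀ = M → (∀ s, t ≤ s → s < s₀ → g s ≠ M) →
      pvVFold g n t (maxx, minbr) = (M, (s₀ : Int)) := by
  intro n
  induction n with
  | zero => intro t maxx minbr s₀ _ _ _ h4 h5 _ _; omega
  | succ n ih =>
    intro t maxx minbr s₀ hub hmax hmb hs1 hs2 hs3 hleast
    by_cases hgt : g t = M
    · have hs0 : s₀ = t := by
        by_contra hne
        exact hleast t le_rfl (by omega) hgt
      subst hs0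
      have hupd : pvUpd (maxx, minbr) (g s₀) (s₀ : Int) = (M, (s₀ : Int)) := by
        rw [pvUpd_spec, if_neg (by rintro ⟨h1, _⟩; omega), if_pos (by omega), hgt]
      show pvVFold g n (s₀ + 1) (pvUpd (maxx, minbr) (g s₀) (s₀ : Int)) = (M, (s₀ : Int))
      rw [hupd]
      exact vfold_post g M _ n (s₀ + 1)
        (fun s h1 h2 => hub s (by omega) (by omega)) (by push_cast; omega)
    · have hglt : g t < M := lt_of_le_of_ne (hub t le_rfl (by omega)) hgt
      have hs0' : t < s₀ := by
        rcases Nat.lt_or_ge t s₀ with h | h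
        · exact h
        · have heq : s₀ = t := by omega
          rw [heq] at hs3; exact absurd hs3 hgt
      show pvVFold g n (t + 1) (pvUpd (maxx, minbr) (g t) (t : Int)) = (M, (s₀ : Int))
      rw [pvUpd_spec, if_neg (by rintro ⟨_, h2⟩; omega)]
      by_cases h : maxx < g t
      · rw [if_pos h]
        exact ih (t + 1) (g t) (t : Int) s₀ (fun s u v => hub s (by omega) (by omega))
          hglt (by push_cast; omega) (by omega) (by omega) hs3
          (fun s u v => hleast s (by omega) v)
      · rw [if_neg h]
        exact ih (t + 1) maxx minbr s₀ (fun s u v => hub s (by omega) (by omega))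
          hmax (by push_cast; omega) (by omega) (by omega) hs3
          (fun s u v => hleast s (by omega) v)

theorem vfoldB (g : Nat → Int) (M : Int) :
    ∀ (n t : Nat) (minbr : Int) (s₀ : Nat),
      (∀ s, t ≤ s → s < t + n → g s ≤ M) →
      t ≤ s₀ → s₀ < t + n → g s₀ = M → (∀ s, t ≤ s → s < s₀ → g s ≠ M) →
      pvVFold g n t (M, minbr) = (M, min minbr (s₀ : Int)) := by
  intro n
  induction n with
  | zero => intro t minbr s₀ _ h2 h3 _ _; omega
  | succ n ih =>
    intro t minbr s₀ hub hs1 hs2 hs3 hleast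
    by_cases hgt : g t = M
    · have hs0 : s₀ = t := by
        by_contra hne
        exact hleast t le_rfl (by omega) hgt
      subst hs0
      by_cases hlt : (s₀ : Int) < minbr
      · have hupd : pvUpd (M, minbr) (g s₀) (s₀ : Int) = (M, (s₀ : Int)) := by
          rw [pvUpd_spec, if_pos (And.intro hgt hlt), hgt]
        show pvVFold g n (s₀ + 1) (pvUpd (M, minbr) (g s₀) (s₀ : Int)) = (M, min minbr (s₀ : Int))
        rw [hupd, vfold_post g M _ n (s₀ + 1)
          (fun s u v => hub s (by omega) (by omega)) (by push_cast; omega)]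
        have : min minbr ((s₀ : Nat) : Int) = ((s₀ : Nat) : Int) := by omega
        rw [this]
      · have hupd : pvUpd (M, minbr) (g s₀) (s₀ : Int) = (M, minbr) := by
          rw [pvUpd_spec, if_neg (by rintro ⟨_, h2⟩; omega), if_neg (by omega)]
        show pvVFold g n (s₀ + 1) (pvUpd (M, minbr) (g s₀) (s₀ : Int)) = (M, min minbr (s₀ : Int))
        rw [hupd, vfold_post g M minbr n (s₀ + 1)
          (fun s u v => hub s (by omega) (by omega)) (by omega)]
        have : min minbr ((s₀ : Nat) : Int) = minbr := by omega
        rw [this]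
    · have hglt : g t < M := lt_of_le_of_ne (hub t le_rfl (by omega)) hgt
      have hs0' : t < s₀ := by
        rcases Nat.lt_or_ge t s₀ with h | h
        · exact h
        · have heq : s₀ = t := by omega
          rw [heq] at hs3; exact absurd hs3 hgt
      have hupd : pvUpd (M, minbr) (g t) (t : Int) = (M, minbr) := by
        rw [pvUpd_spec, if_neg (by rintro ⟨h1, _⟩; omega), if_neg (by omega)]
      show pvVFold g n (t + 1) (pvUpd (M, minbr) (g t) (t : Int)) = (M, min minbr (s₀ : Int))
      rw [hupd]
      exact ih (t + 1) minbr s₀ (fun s u v => hub s (by omega) (by omega))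
        (by omega) (by omega) hs3 (fun s u v => hleast s (by omega) v)

theorem bsel_case1 (a : Nat) (m : List Int) (Mv : Int)
    (hMv : PySem.List.max? m (fun x => x) = some Mv) (hc : m.getD 0 0 = Mv) :
    pvBsel a m = [Mv, 0] := by
  have hMgd : (PySem.List.max? m (fun x => x)).getD 0 = Mv := by rw [hMv]; rfl
  unfold pvBsel
  rw [hMgd, if_pos hc]

theorem bsel_case2 (a : Nat) (m : List Int) (Mv : Int) (jx jn : Nat)
    (hMv : PySem.List.max? m (fun x => x) = some Mv) (hc : ¬ m.getD 0 0 = Mv)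
    (hjx : PySem.List.max? ((List.range' 1 (a - 1)).filter (fun j => decide (m.getD j 0 = Mv)))
            (fun x => x) = some jx)
    (hjn : PySem.List.min? ((List.range' 1 (a - 1)).filter (fun j => decide (m.getD j 0 = Mv)))
            (fun x => x) = some jn) :
    pvBsel a m = [Mv, min ((a : Int) - (jx : Int)) (jn : Int)] := by
  have hMgd : (PySem.List.max? m (fun x => x)).getD 0 = Mv := by rw [hMv]; rfl
  unfold pvBsel
  rw [hMgd, if_neg hc]
  simp only [hjx, hjn, Option.getD_some]

theorem core_eq (l1 l2 : List Char) : pvAcore l1 l2 = pvBcore l1 l2 := by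
  by_cases h0 : l1.length = 0
  · rw [List.length_eq_zero_iff] at h0
    subst h0
    rfl
  · replace h0 : 0 < l1.length := Nat.pos_of_ne_zero h0
    -- abbreviations
    set a := l1.length with ha
    set L := min l1.length l2.length with hL
    set t2 := PySem.List.slice l2 none (some ((L : Nat) : Int)) with ht2
    set f : Nat → Int := pvMB (l1 ++ l1) t2 L with hf
    set m : List Int := (List.range a).map f with hm
    have hmlen : m.length = a := by simp [hm]
    have hmne : m ≠ [] := by
      intro h; rw [h] at hmlen; simp at hmlen; omega
    -- the maximum of m
    obtain ⟨Mv, hMv⟩ : ∃ Mv, PySem.List.max? m (fun x => x) = some Mv := by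
      cases hme : m with
      | nil => exact absurd hme hmne
      | cons x t => exact ⟨t.foldl max x, PySem.List.max?_id_cons x t⟩
    have hgetm : ∀ j, j < a → m.getD j 0 = f j := by
      intro j hj
      rw [hm, List.getD_eq_getElem _ _ (by simpa [hm] using hj)]
      simp
    have hub : ∀ j, j < a → f j ≤ Mv := by
      intro j hj
      have : f j ∈ m := by rw [hm]; exact List.mem_map_of_mem (by simpa using hj)
      simpa using PySem.List.max?_isMax hMv _ this
    have hex : ∃ j, j < a ∧ f j = Mv := by
      have := PySem.List.max?_mem hMv
      rw [hm] at this
      obtain ⟨j, hj, hje⟩ := List.mem_map.mp this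
      exact ⟨j, by simpa using hj, hje⟩
    have hnn : ∀ i, 0 ≤ f i := by
      intro i; rw [hf]; unfold pvMB; positivity
    have hM0 : 0 ≤ Mv := by
      obtain ⟨j, hj, hje⟩ := hex; rw [← hje]; exact hnn j
    -- value of A's compare at any rotation
    have hcnt : ∀ k, pvCnt (l1.rotate k) l2 L = f (k % a) := by
      intro k
      rw [hL, hf, ht2, hL]
      exact cnt_rotate_eq_pvMB l1 l2 k h0
    have hgR : ∀ s, pvCnt (l1.rotate (s * (a - 1))) l2 L ≤ Mv := by
      intro s; rw [hcnt]; exact hub _ (Nat.mod_lt _ h0)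
    have hgL : ∀ s, pvCnt (l1.rotate s) l2 L ≤ Mv := by
      intro s; rw [hcnt]; exact hub _ (Nat.mod_lt _ h0)
    have hg0 : pvCnt (l1.rotate (0 * (a - 1))) l2 L = f 0 := by
      rw [hcnt]; simp
    have hg0' : pvCnt (l1.rotate 0) l2 L = f 0 := by
      rw [hcnt]; simp
    -- unfold A via the two loop lemmas
    have hA : pvAcore l1 l2
        = [ (pvVFold (fun s => pvCnt (l1.rotate s) l2 L) a 0
              (pvVFold (fun s => pvCnt (l1.rotate (s * (a - 1))) l2 L) a 0 (0, 0))).1,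
            (pvVFold (fun s => pvCnt (l1.rotate s) l2 L) a 0
              (pvVFold (fun s => pvCnt (l1.rotate (s * (a - 1))) l2 L) a 0 (0, 0))).2 ] := by
      have hrid : l1.rotate (a * (a - 1)) = l1 := by
        rw [← List.rotate_mod]
        simp [← ha]
      have hr := loopR_eq l1 l2 l2.length h0 rfl a 0 ((0 : Int), (0 : Int))
      simp only [zero_mul, List.rotate_zero, Nat.cast_zero, Nat.zero_add, ← ha] at hr
      have hsl := loopL_eq l1 l2 l2.length h0 rfl a 0
        (pvVFold (fun s => pvCnt (l1.rotate (s * (a - 1))) l2 L) a 0 ((0 : Int), (0 : Int)))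
      simp only [List.rotate_zero, Nat.cast_zero, Nat.zero_add, ← ha] at hsl
      unfold pvAcore
      simp only [← ha]
      rw [hr, hrid]
      simp only []
      rw [hsl]
    have hBun : pvBcore l1 l2 = pvBsel a m := by
      unfold pvBcore
      rw [if_neg (by omega : ¬ l1.length = 0)]
    rw [hA, hBun]
    by_cases hc : f 0 = Mv
    · -- the best shift is 0
      have hVR : pvVFold (fun s => pvCnt (l1.rotate (s * (a - 1))) l2 L) a 0 (0, 0) = (Mv, 0) := by
        rcases eq_or_lt_of_le hM0 with hMz | hMp
        · rw [← hMz]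
          exact vfold_post _ 0 0 a 0 (fun s _ _ => by rw [← hMz] at hgR; exact hgR s) le_rfl
        · have := vfoldA (fun s => pvCnt (l1.rotate (s * (a - 1))) l2 L) Mv a 0 0 0 0
            (fun s _ _ => hgR s) hMp le_rfl (le_refl 0) (by omega) (by show pvCnt (l1.rotate (0 * (a - 1))) l2 L = Mv; rw [hg0]; exact hc)
            (fun s u v => absurd v (by omega))
          simpa using this
      have hVL : pvVFold (fun s => pvCnt (l1.rotate s) l2 L) a 0 (Mv, 0) = (Mv, 0) := by
        have := vfoldB (fun s => pvCnt (l1.rotate s) l2 L) Mv a 0 0 0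
          (fun s _ _ => hgL s) (le_refl 0) (by omega) (by show pvCnt (l1.rotate 0) l2 L = Mv; rw [hg0']; exact hc)
          (fun s u v => absurd v (by omega))
        simpa using this
      rw [hVR, hVL, bsel_case1 a m Mv hMv (by rw [hgetm 0 h0]; exact hc)]
    · -- the best shift is positive
      have hlt0 : f 0 < Mv := lt_of_le_of_ne (hub 0 h0) hc
      have hMp : 0 < Mv := lt_of_le_of_lt (hnn 0) hlt0
      have hjs_iff : ∀ j, (j ∈ (List.range' 1 (a - 1)).filter (fun j => decide (m.getD j 0 = Mv)))
          ↔ (1 ≤ j ∧ j < a ∧ f j = Mv) := by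
        intro j
        rw [List.mem_filter, List.mem_range'_1]
        constructor
        · rintro ⟨⟨h1, h2⟩, hd⟩
          have hja : j < a := by omega
          refine ⟨h1, hja, ?_⟩
          have := of_decide_eq_true hd
          rwa [hgetm j hja] at this
        · rintro ⟨h1, hja, hfj⟩
          exact ⟨⟨h1, by omega⟩, decide_eq_true (by rw [hgetm j hja]; exact hfj)⟩
      have hjsne : (List.range' 1 (a - 1)).filter (fun j => decide (m.getD j 0 = Mv)) ≠ [] := by
        obtain ⟨j₀, hj₀a, hj₀⟩ := hex
        have hj₀1 : 1 ≤ j₀ := by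
          rcases Nat.eq_zero_or_pos j₀ with h | h
          · rw [h] at hj₀; exact absurd hj₀ hc
          · exact h
        intro hnil
        have := (hjs_iff j₀).mpr ⟨hj₀1, hj₀a, hj₀⟩
        rw [hnil] at this
        exact List.not_mem_nil this
      obtain ⟨jx, hjx⟩ : ∃ jx, PySem.List.max?
          ((List.range' 1 (a - 1)).filter (fun j => decide (m.getD j 0 = Mv))) (fun x => x) = some jx := by
        cases hme : (List.range' 1 (a - 1)).filter (fun j => decide (m.getD j 0 = Mv)) with
        | nil => exact absurd hme hjsne
        | cons x t => exact ⟨t.foldl max x, PySem.List.max?_id_cons x t⟩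
      obtain ⟨jn, hjn⟩ : ∃ jn, PySem.List.min?
          ((List.range' 1 (a - 1)).filter (fun j => decide (m.getD j 0 = Mv))) (fun x => x) = some jn := by
        cases hme : (List.range' 1 (a - 1)).filter (fun j => decide (m.getD j 0 = Mv)) with
        | nil => exact absurd hme hjsne
        | cons x t => exact ⟨t.foldl min x, PySem.List.min?_id_cons x t⟩
      obtain ⟨hjx1, hjxa, hfjx⟩ := (hjs_iff jx).mp (PySem.List.max?_mem hjx)
      obtain ⟨hjn1, hjna, hfjn⟩ := (hjs_iff jn).mp (PySem.List.min?_mem hjn)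
      have hjx_ub : ∀ j, 1 ≤ j → j < a → f j = Mv → j ≤ jx := by
        intro j u v w
        simpa using PySem.List.max?_isMax hjx j ((hjs_iff j).mpr ⟨u, v, w⟩)
      have hjn_lb : ∀ j, 1 ≤ j → j < a → f j = Mv → jn ≤ j := by
        intro j u v w
        simpa using PySem.List.min?_isMin hjn j ((hjs_iff j).mpr ⟨u, v, w⟩)
      have hVR : pvVFold (fun s => pvCnt (l1.rotate (s * (a - 1))) l2 L) a 0 (0, 0)
          = (Mv, ((a - jx : Nat) : Int)) := by
        apply vfoldA _ Mv a 0 0 0 (a - jx) (fun s _ _ => hgR s) hMp le_rfl (by omega) (by omega)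
        · show pvCnt (l1.rotate ((a - jx) * (a - 1))) l2 L = Mv
          rw [hcnt, rotidx a (a - jx) (by omega) (by omega),
            (by omega : a - (a - jx) = jx)]
          exact hfjx
        · intro s _ hs
          show pvCnt (l1.rotate (s * (a - 1))) l2 L ≠ Mv
          rw [hcnt]
          rcases Nat.eq_zero_or_pos s with h | h
          · rw [h]; simpa using hc
          · rw [rotidx a s h (by omega)]
            intro heq
            have := hjx_ub (a - s) (by omega) (by omega) heq
            omega
      have hVL : pvVFold (fun s => pvCnt (l1.rotate s) l2 L) a 0 (Mv, ((a - jx : Nat) : Int))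
          = (Mv, min ((a - jx : Nat) : Int) (jn : Int)) := by
        apply vfoldB _ Mv a 0 _ jn (fun s _ _ => hgL s) (by omega) (by omega)
        · show pvCnt (l1.rotate jn) l2 L = Mv
          rw [hcnt, Nat.mod_eq_of_lt hjna]
          exact hfjn
        · intro s _ hs
          show pvCnt (l1.rotate s) l2 L ≠ Mv
          rw [hcnt, Nat.mod_eq_of_lt (by omega)]
          intro heq
          rcases Nat.eq_zero_or_pos s with h | h
          · rw [h] at heq; exact hc heq
          · have := hjn_lb s h (by omega) heq
            omega
      rw [hVR, hVL, bsel_case2 a m Mv jx jn hMv (by rw [hgetm 0 h0]; exact hc) hjx hjn]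
      have : ((a - jx : Nat) : Int) = (a : Int) - (jx : Int) := by omega
      rw [this]

-- ===== VERDICT (by name: the statement is the Claim_ definition above) =====
theorem poklapanje_spec : Claim_equal_poklapanje := by
  intro s1 s2 _
  unfold Spec_poklapanje poklapanje poklapanje_alt
  exact core_eq s1.toList s2.toList
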